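-- pv_equiv track=rewrite | github.com/agasthyaps/CODEWORDS-BENCH | src/agents/cluer.py | format_board_display
-- ===== SOURCE A (Python) =====
-- from typing import Any
--
-- def format_board_display(words: list[str], revealed: dict[str, Any]) -> str:
--     """Format board words for display, marking revealed ones."""
--     lines = []
--     for i in range(0, len(words), 5):
--         row_words = words[i:i+5]
--         formatted = []
--         for word in row_words:
--             if word in revealed:
--                 formatted.append(f"[{word}]")  # Mark as revealed
--             else:
--                 formatted.append(word)
--         lines.append("  ".join(formatted))
--     return "\n".join(lines)
-- ===== SOURCE B (Python) =====
-- def format_board_display(words: list[str], revealed: dict) -> str: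
--     """Format board words for display, marking revealed ones."""
--     # Single flat pass: emit a separator before every word except the first
--     # (newline at a row boundary, double space within a row), then the word.
--     # No slicing into rows and no nested joins.
--     parts = []
--     for i, word in enumerate(words):
--         if i > 0:
--             parts.append("\n" if i % 5 == 0 else "  ")
--         parts.append(f"[{word}]" if word in revealed else word)
--     return "".join(parts)
-- ===== Notes on version B (the rewrite author's own statement) =====
-- stated objective: alternative
-- what changed: B replaces A's chunk-into-rows-of-5 with nested joins (inner format loop, ' '.join per row, '\n'.join of rows) by one flat pass over enumerate(words) that emits the separator ('\n' at i%5==0, ' ' otherwise) before each word and concatenates once; no slicing, no row lists, no nested joins.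
import Mathlib
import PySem

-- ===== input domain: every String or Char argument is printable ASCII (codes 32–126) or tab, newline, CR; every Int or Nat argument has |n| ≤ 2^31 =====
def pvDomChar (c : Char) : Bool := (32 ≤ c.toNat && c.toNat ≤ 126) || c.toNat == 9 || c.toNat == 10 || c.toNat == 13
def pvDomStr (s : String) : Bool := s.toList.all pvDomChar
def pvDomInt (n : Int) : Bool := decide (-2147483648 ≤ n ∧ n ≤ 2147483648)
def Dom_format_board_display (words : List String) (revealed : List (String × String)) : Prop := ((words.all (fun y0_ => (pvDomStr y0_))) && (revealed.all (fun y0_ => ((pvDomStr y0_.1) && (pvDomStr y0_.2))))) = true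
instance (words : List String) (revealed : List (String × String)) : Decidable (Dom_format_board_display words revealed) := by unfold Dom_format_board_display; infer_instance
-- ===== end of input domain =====

-- B replaces A's rows-of-5 chunking with nested joins by one flat pass over enumerate(words) that emits each separator ('\n' at row boundaries, '  ' inside a row) before the word and concatenates once.


-- ===== PORT A =====
-- literal transliteration: outer loop over range(0, len(words), 5), inner loop formats each word of the slice
def format_board_display (words : List String) (revealed : List (String × String)) : String :=
  let lines :=
    (PySem.List.pyRange 0 (words.length : Int) 5).foldl
      (fun lines i =>
        let row_words := PySem.List.slice words (some i) (some (i + 5))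
        let formatted :=
          row_words.foldl
            (fun formatted word =>
              if revealed.any (fun kv => kv.1 == word) then formatted ++ ["[" ++ word ++ "]"]
              else formatted ++ [word])
            []
        lines ++ [PySem.Str.join "  " formatted])
      []
  PySem.Str.join "\n" lines

-- ===== PORT B =====
-- B's single loop over enumerate(words): separator piece first (when i > 0), then the formatted word
def format_board_display_alt (words : List String) (revealed : List (String × String)) : String :=
  let parts :=
    (PySem.List.enumerate words).foldl
      (fun parts iw =>
        let parts :=
          if 0 < iw.1 then
            parts ++ [if PySem.Int.mod iw.1 5 == 0 then "\n" else "  "]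
          else parts
        if revealed.any (fun kv => kv.1 == iw.2) then parts ++ ["[" ++ iw.2 ++ "]"]
        else parts ++ [iw.2])
      []
  PySem.Str.join "" parts

-- ===== PRECONDITION & SPEC =====
def Spec_format_board_display (words : List String) (revealed : List (String × String)) (out : String) : Prop := out = format_board_display_alt words revealed
instance (words : List String) (revealed : List (String × String)) (out : String) : Decidable (Spec_format_board_display words revealed out) := by unfold Spec_format_board_display; infer_instance

-- ===== CLAIM =====
def Claim_equal_format_board_display : Prop := ∀ (words : List String) (revealed : List (String × String)), Dom_format_board_display words revealed → Spec_format_board_display words revealed (format_board_display words revealed)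

-- ===== LEMMAS AND PROOFS =====

-- the per-word formatter both programs apply
def fbdFmt (revealed : List (String × String)) (w : String) : String :=
  if revealed.any (fun kv => kv.1 == w) then "[" ++ w ++ "]" else w

-- A's rows, as a recursion over the start index (proof-side characterization of A's loop)
def fbdRowsA (fs : List String) (i : Nat) : List String :=
  if i < fs.length then
    PySem.Str.join "  " ((fs.drop i).take 5) :: fbdRowsA fs (i + 5)
  else []
termination_by fs.length - i

-- chunks of 5
def fbdChunks {α : Type} (l : List α) : List (List α) :=
  if h : l = [] then [] else l.take 5 :: fbdChunks (l.drop 5)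
termination_by l.length
decreasing_by
  cases l with
  | nil => exact absurd rfl h
  | cons a t => simp

-- B's flat piece list, indexed recursion
def fbdPieces (revealed : List (String × String)) (n : Nat) : List String → List String
  | [] => []
  | w :: ws =>
      (if n = 0 then [] else [if n % 5 = 0 then "\n" else "  "]) ++
        [fbdFmt revealed w] ++ fbdPieces revealed (n + 1) ws

-- char-level separator and flat concatenation
def fbdSep (n : Nat) : List Char :=
  if n = 0 then [] else if n % 5 = 0 then ['\n'] else [' ', ' ']

def fbdCat (n : Nat) : List (List Char) → List Char
  | [] => []
  | c :: cs => fbdSep n ++ c ++ fbdCat (n + 1) cs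

-- A's inner loop is a map of the formatter over the row slice
lemma inner_loop_eq_map (revealed : List (String × String)) (l : List String) :
    l.foldl
      (fun formatted word =>
        if revealed.any (fun kv => kv.1 == word) then formatted ++ ["[" ++ word ++ "]"]
        else formatted ++ [word]) []
    = l.map (fbdFmt revealed) := by
  have h : (fun (formatted : List String) (word : String) =>
      if revealed.any (fun kv => kv.1 == word) then formatted ++ ["[" ++ word ++ "]"]
      else formatted ++ [word])
    = fun formatted word => formatted ++ [fbdFmt revealed word] := by
    funext acc w; by_cases h : revealed.any (fun kv => kv.1 == w) <;> simp [fbdFmt, h]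
  rw [h, PySem.List.foldl_append_singleton_eq_map]
  simp

-- the chunk-by-index map of A equals the row recursion
lemma rows_spec (zs : List String) (i : Nat) :
    (List.range ((zs.length - i + 4) / 5)).map
      (fun k => PySem.Str.join "  " ((zs.drop (i + 5 * k)).take 5)) = fbdRowsA zs i := by
  induction i using fbdRowsA.induct (fs := zs) with
  | case1 i hi ih =>
      rw [fbdRowsA, if_pos hi]
      have hm : (zs.length - i + 4) / 5 = (zs.length - (i + 5) + 4) / 5 + 1 := by omega
      rw [hm, List.range_succ_eq_map, List.map_cons, List.map_map]
      congr 1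
      rw [← ih]
      apply List.map_congr_left
      intro k _
      simp only [Function.comp]
      have e : i + 5 * Nat.succ k = i + 5 + 5 * k := by omega
      rw [e]
  | case2 i hi =>
      rw [fbdRowsA, if_neg hi]
      have : (zs.length - i + 4) / 5 = 0 := by omega
      simp [this]

-- A's value as rows of the formatted list
lemma A_eq_rows (words : List String) (revealed : List (String × String)) :
    format_board_display words revealed
      = PySem.Str.join "\n" (fbdRowsA (words.map (fbdFmt revealed)) 0) := by
  unfold format_board_display
  simp only [inner_loop_eq_map, PySem.List.foldl_append_singleton_eq_map, List.nil_append]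
  congr 1
  rw [← rows_spec _ 0]
  simp only [Nat.sub_zero]
  have hr : PySem.List.pyRange 0 (words.length : Int) 5
      = (List.range ((words.length + 4) / 5)).map (fun k => ((5 * k : Nat) : Int)) := by
    rw [PySem.List.pyRange_of_pos 0 (words.length : Int) (by norm_num)]
    congr 1
    · funext k; push_cast; ring
    · congr 1
      split_ifs with h
      · have e : ((words.length : Int) - 0 + 5 - 1) = ((words.length + 4 : Nat) : Int) := by
          push_cast; ring
        rw [e]; omega
      · omega
  rw [hr, List.map_map]
  simp only [List.length_map]
  apply List.map_congr_left
  intro k _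
  simp only [Function.comp]
  have h5 : ((5 * k : Nat) : Int) + 5 = ((5 * k : Nat) : Int) + ((5 : Nat) : Int) := by norm_num
  rw [h5, PySem.List.slice_natCast_add, List.map_take, List.map_drop]
  norm_num

-- the row recursion is the map of the row join over the chunks
lemma rowsA_eq_chunks (fs : List String) (i : Nat) :
    fbdRowsA fs i = (fbdChunks (fs.drop i)).map (fun r => PySem.Str.join "  " r) := by
  induction i using fbdRowsA.induct (fs := fs) with
  | case1 i hi ih =>
      rw [fbdRowsA, if_pos hi, fbdChunks, dif_neg (by simp; omega)]
      rw [List.map_cons, List.drop_drop]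
      rw [ih]
  | case2 i hi =>
      rw [fbdRowsA, if_neg hi, List.drop_eq_nil_of_le (by omega), fbdChunks]
      simp

-- B's fold over enumerate is the flat piece list
lemma foldB_eq_pieces (revealed : List (String × String)) (ws : List String) (n : Nat)
    (acc : List String) :
    (PySem.List.enumerate ws (n : Int)).foldl
      (fun parts iw =>
        let parts :=
          if 0 < iw.1 then
            parts ++ [if PySem.Int.mod iw.1 5 == 0 then "\n" else "  "]
          else parts
        if revealed.any (fun kv => kv.1 == iw.2) then parts ++ ["[" ++ iw.2 ++ "]"]
        else parts ++ [iw.2]) acc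
      = acc ++ fbdPieces revealed n ws := by
  induction ws generalizing n acc with
  | nil => simp [PySem.List.enumerate_nil, fbdPieces]
  | cons w ws ih =>
      rw [PySem.List.enumerate_cons, List.foldl_cons]
      have hcast : ((n : Int) + 1) = ((n + 1 : Nat) : Int) := by push_cast; ring
      rw [hcast, ih]
      have hmod : PySem.Int.mod (n : Int) 5 = ((n % 5 : Nat) : Int) := by
        rw [show (5 : Int) = ((5 : Nat) : Int) by norm_num, PySem.Int.mod_natCast]
      simp only [hmod, fbdPieces, fbdFmt]
      by_cases h0 : n = 0
      · subst h0
        by_cases hr : revealed.any (fun kv => kv.1 == w) <;> simp [hr]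
      · have hpos : (0 : Int) < (n : Int) := by exact_mod_cast Nat.pos_of_ne_zero h0
        rw [if_pos hpos]
        by_cases hm : n % 5 = 0
        · by_cases hr : revealed.any (fun kv => kv.1 == w) <;> simp [hm, hr, h0]
        · have hnd : ¬ (5 : Int) ∣ (n : Int) := by omega
          by_cases hr : revealed.any (fun kv => kv.1 == w) <;> simp [hm, hr, h0, hnd]

-- the pieces, flattened to chars, are the indexed concatenation
lemma pieces_toList (revealed : List (String × String)) (ws : List String) (n : Nat) :
    ((fbdPieces revealed n ws).map String.toList).flatten
      = fbdCat n (ws.map (fun w => (fbdFmt revealed w).toList)) := by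
  induction ws generalizing n with
  | nil => simp [fbdPieces, fbdCat]
  | cons w ws ih =>
      simp only [fbdPieces, List.map_cons, List.map_append, List.flatten_append,
        List.flatten_cons, fbdCat, fbdSep]
      rw [← ih]
      by_cases h0 : n = 0
      · simp [h0]
      · by_cases hm : n % 5 = 0 <;> simp [h0, hm]

-- join with the empty separator is flatten
lemma join_nil_eq_flatten (ps : List (List Char)) :
    PySem.Chars.join [] ps = ps.flatten := by
  induction ps with
  | nil => simp [PySem.Chars.join_nil]
  | cons p ps ih =>
      cases ps with
      | nil => simp [PySem.Chars.join_singleton]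
      | cons q rest =>
          rw [PySem.Chars.join_cons_cons, ih]
          simp

-- a joined row, head plus separated tail
lemma join_cons_flatMap (s : List Char) (c : List Char) (rs : List (List Char)) :
    PySem.Chars.join s (c :: rs) = c ++ rs.flatMap (fun r => s ++ r) := by
  induction rs generalizing c with
  | nil => simp [PySem.Chars.join_singleton]
  | cons q rest ih =>
      rw [PySem.Chars.join_cons_cons, ih]
      simp

-- within a row, every separator is the double space
lemma cat_row_tail (rs : List (List Char)) (n : Nat) (h0 : 0 < n) (hm : n % 5 ≠ 0)
    (hb : n % 5 + rs.length ≤ 5) :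
    fbdCat n rs = rs.flatMap (fun r => [' ', ' '] ++ r) := by
  induction rs generalizing n with
  | nil => simp [fbdCat]
  | cons c cs ih =>
      rw [fbdCat, fbdSep, if_neg (by omega), if_neg hm]
      cases cs with
      | nil => simp [fbdCat]
      | cons d ds =>
          rw [ih (n + 1) (by omega) (by simp at hb ⊢; omega) (by simp at hb ⊢; omega)]
          simp

-- fbdCat depends on the index only through positivity and its residue mod 5
lemma cat_shift (ys : List (List Char)) (n m : Nat) (hn : 0 < n) (hm : 0 < m)
    (h : n % 5 = m % 5) : fbdCat n ys = fbdCat m ys := by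
  induction ys generalizing n m with
  | nil => rfl
  | cons c cs ih =>
      have hsep : fbdSep n = fbdSep m := by
        unfold fbdSep
        rw [if_neg (show ¬ n = 0 by omega), if_neg (show ¬ m = 0 by omega), h]
      rw [fbdCat, fbdCat, hsep, ih (n + 1) (m + 1) (by omega) (by omega) (by omega)]

-- a fresh row starts with a newline
lemma cat_row_start (ys : List (List Char)) (h : ys ≠ []) :
    fbdCat 5 ys = '\n' :: fbdCat 0 ys := by
  cases ys with
  | nil => exact absurd rfl h
  | cons c cs =>
      rw [fbdCat, fbdCat, fbdSep, fbdSep]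
      rw [cat_shift cs 6 1 (by omega) (by omega) (by omega)]
      simp

-- fbdCat splits over append
lemma cat_append (xs ys : List (List Char)) (n : Nat) :
    fbdCat n (xs ++ ys) = fbdCat n xs ++ fbdCat (n + xs.length) ys := by
  induction xs generalizing n with
  | nil => simp [fbdCat]
  | cons c cs ih =>
      simp only [List.cons_append, fbdCat, ih (n + 1), List.length_cons]
      have : n + 1 + cs.length = n + (cs.length + 1) := by omega
      simp [this]

-- a single row (length ≤ 5) joined equals its indexed concatenation from 0
lemma cat_zero_row (gs : List (List Char)) (h : gs ≠ []) (hl : gs.length ≤ 5) :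
    PySem.Chars.join [' ', ' '] gs = fbdCat 0 gs := by
  cases gs with
  | nil => exact absurd rfl h
  | cons c cs =>
      rw [join_cons_flatMap, fbdCat, fbdSep]
      rw [cat_row_tail cs 1 (by omega) (by omega) (by simp at hl ⊢; omega)]
      simp

-- chunks commute with map
lemma chunks_map {α β : Type} (g : α → β) (l : List α) :
    fbdChunks (l.map g) = (fbdChunks l).map (List.map g) := by
  induction l using fbdChunks.induct with
  | case1 => simp [fbdChunks]
  | case2 l h ih =>
      conv_lhs => rw [fbdChunks]
      conv_rhs => rw [fbdChunks]
      rw [dif_neg (show ¬ l.map g = [] by simpa using h), dif_neg h]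
      rw [List.map_cons, ← List.map_take, ← List.map_drop, ih]

-- the key glue: joining the chunked rows equals the flat concatenation
lemma join_chunks_eq_cat (gs : List (List Char)) :
    PySem.Chars.join ['\n'] ((fbdChunks gs).map (PySem.Chars.join [' ', ' '])) = fbdCat 0 gs := by
  induction gs using fbdChunks.induct with
  | case1 => simp [fbdChunks, fbdCat, PySem.Chars.join_nil]
  | case2 l h ih =>
      rw [fbdChunks, dif_neg h, List.map_cons]
      by_cases hd : l.drop 5 = []
      · have hl : l.length ≤ 5 := by
          rw [List.drop_eq_nil_iff] at hd; omega
        rw [hd, fbdChunks, dif_pos rfl, List.map_nil, PySem.Chars.join_singleton]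
        rw [List.take_of_length_le hl]
        exact cat_zero_row l h hl
      · have hl : 5 < l.length := by
          by_contra hc
          exact hd (List.drop_eq_nil_of_le (by omega))
        obtain ⟨q, rest, hq⟩ : ∃ q rest, fbdChunks (l.drop 5) = q :: rest := by
          rw [fbdChunks, dif_neg hd]; exact ⟨_, _, rfl⟩
        rw [hq, List.map_cons, PySem.Chars.join_cons_cons, ← List.map_cons, ← hq, ih]
        conv_rhs => rw [← List.take_append_drop 5 l]
        rw [cat_append, List.length_take, min_eq_left (by omega)]
        rw [cat_row_start _ hd]
        rw [cat_zero_row (l.take 5) (by simp; omega) (by simp)]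
        simp

-- ===== VERDICT =====
theorem format_board_display_spec : Claim_equal_format_board_display := by
  intro words revealed _
  unfold Spec_format_board_display format_board_display_alt
  rw [show PySem.List.enumerate words 0
        = PySem.List.enumerate words ((0 : Nat) : Int) by norm_num]
  rw [foldB_eq_pieces, List.nil_append, A_eq_rows, rowsA_eq_chunks, List.drop_zero]
  unfold PySem.Str.join
  congr 1
  rw [show ("\n" : String).toList = ['\n'] from rfl,
    show ("" : String).toList = ([] : List Char) from rfl]
  rw [join_nil_eq_flatten, pieces_toList, List.map_map]
  have hfun : (String.toList ∘ fun r : List String =>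
        String.ofList (PySem.Chars.join "  ".toList (List.map String.toList r)))
      = fun r : List String => PySem.Chars.join [' ', ' '] (r.map String.toList) := by
    funext r
    show (String.ofList (PySem.Chars.join "  ".toList (List.map String.toList r))).toList
        = PySem.Chars.join [' ', ' '] (List.map String.toList r)
    rw [show ("  " : String).toList = [' ', ' '] from rfl]
    simp [pysem]
  rw [hfun]
  have hmm : (fbdChunks (words.map (fbdFmt revealed))).map
        (fun r => PySem.Chars.join [' ', ' '] (r.map String.toList))
      = ((fbdChunks (words.map (fbdFmt revealed))).map (List.map String.toList)).map
          (PySem.Chars.join [' ', ' ']) := by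
    rw [List.map_map]
    rfl
  rw [hmm, ← chunks_map, List.map_map]
  exact join_chunks_eq_cat _
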